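-- pv_equiv track=rewrite | github.com/seeker71/Coherence-Network | scripts/add_concurrency_notes.py | insert_concurrency_section
-- ===== SOURCE A (Python) =====
-- CONCURRENCY_SECTION = """## Concurrency Behavior
--
-- - **Read operations**: Safe for concurrent access; no locking required.
-- - **Write operations**: Last-write-wins semantics; no optimistic locking for MVP.
-- - **Recommendation**: Clients should not assume atomic read-modify-write without explicit ETag support.
-- """
--
-- INSERT_BEFORE = [
--     "## Failure and Retry",
--     "## Risks",
--     "## Verification",
-- ]
--
-- def insert_concurrency_section(content: str) -> str | None:
--     """Insert concurrency section before the first matching heading. Returns None if no anchor found."""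
--     earliest_pos = None
--     for heading in INSERT_BEFORE:
--         pos = content.find(heading)
--         if pos != -1 and (earliest_pos is None or pos < earliest_pos):
--             earliest_pos = pos
--
--     if earliest_pos is None:
--         return None
--
--     return content[:earliest_pos] + CONCURRENCY_SECTION + "\n" + content[earliest_pos:]
-- ===== SOURCE B (Python) =====
-- CONCURRENCY_SECTION = """## Concurrency Behavior
--
-- - **Read operations**: Safe for concurrent access; no locking required.
-- - **Write operations**: Last-write-wins semantics; no optimistic locking for MVP.
-- - **Recommendation**: Clients should not assume atomic read-modify-write without explicit ETag support.
-- """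
--
-- INSERT_BEFORE = [
--     "## Failure and Retry",
--     "## Risks",
--     "## Verification",
-- ]
--
-- def insert_concurrency_section(content: str) -> str | None:
--     """Single left-to-right scan: insert at the first position where any anchor starts."""
--     for i in range(len(content)):
--         if any(content.startswith(h, i) for h in INSERT_BEFORE):
--             return content[:i] + CONCURRENCY_SECTION + "\n" + content[i:]
--     return None
-- ===== Notes on version B (the rewrite author's own statement) =====
-- stated objective: alternative
-- what changed: Replaces the three separate find scans plus running-minimum tracking with one left-to-right pass that stops at the first position where any anchor string starts.
import Mathlib
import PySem

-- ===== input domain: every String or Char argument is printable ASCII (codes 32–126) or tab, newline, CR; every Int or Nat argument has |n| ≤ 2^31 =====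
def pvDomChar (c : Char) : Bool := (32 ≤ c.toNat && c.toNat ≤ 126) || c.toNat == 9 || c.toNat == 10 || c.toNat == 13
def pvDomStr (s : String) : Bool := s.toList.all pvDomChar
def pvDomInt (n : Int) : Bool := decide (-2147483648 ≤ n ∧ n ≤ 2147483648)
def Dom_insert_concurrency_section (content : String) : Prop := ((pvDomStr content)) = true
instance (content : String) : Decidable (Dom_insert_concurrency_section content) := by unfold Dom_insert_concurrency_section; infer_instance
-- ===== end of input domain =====

-- B replaces A's three separate find scans plus running-minimum tracking by a single
-- left-to-right pass that stops at the first position where any anchor heading starts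
-- (objective: alternative; same asymptotic cost).

def pvSection : List Char := ("## Concurrency Behavior\n\n- **Read operations**: Safe for concurrent access; no locking required.\n- **Write operations**: Last-write-wins semantics; no optimistic locking for MVP.\n- **Recommendation**: Clients should not assume atomic read-modify-write without explicit ETag support.\n").toList

def pvAnchors : List (List Char) :=
  [("## Failure and Retry").toList, ("## Risks").toList, ("## Verification").toList]

-- ===== PORT A =====
-- loop 'for heading in INSERT_BEFORE' with the running earliest_pos : Option Int
def pvStepA (cs : List Char) (e : Option Int) (h : List Char) : Option Int :=
  let pos := PySem.Chars.find cs h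
  match e with
  | none => if pos ≠ -1 then some pos else none
  | some p => if pos ≠ -1 ∧ pos < p then some pos else some p

def insert_concurrency_section (content : String) : Option String :=
  let cs := content.toList
  match pvAnchors.foldl (pvStepA cs) none with
  | none => none
  | some p =>
      some (String.ofList (PySem.List.slice cs none (some p) ++ pvSection ++ ['\n'] ++
                       PySem.List.slice cs (some p) none))

-- ===== PORT B =====
-- 'any(content.startswith(h, i) for h in INSERT_BEFORE)'
def pvPredB (suf : List Char) : Bool := pvAnchors.any (fun h => h.isPrefixOf suf)

-- 'for i in range(len(content))': scan the suffixes left to right, tracking the index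
def pvScanB : Nat → List Char → Option Nat
  | _, [] => none
  | i, c :: rest => if pvPredB (c :: rest) then some i else pvScanB (i + 1) rest

def insert_concurrency_section_alt (content : String) : Option String :=
  let cs := content.toList
  match pvScanB 0 cs with
  | none => none
  | some i => some (String.ofList (cs.take i ++ pvSection ++ ['\n'] ++ cs.drop i))

-- ===== PRECONDITION & SPEC =====
def Spec_insert_concurrency_section (content : String) (out : Option String) : Prop := out = insert_concurrency_section_alt content
instance (content : String) (out : Option String) : Decidable (Spec_insert_concurrency_section content out) := by unfold Spec_insert_concurrency_section; infer_instance

-- ===== CLAIM (what is proved, stated in full; the proofs are below) =====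
def Claim_equal_insert_concurrency_section : Prop := ∀ (content : String), Dom_insert_concurrency_section content → Spec_insert_concurrency_section content (insert_concurrency_section content)

-- ===== LEMMAS AND PROOFS =====

theorem pvPredB_iff (suf : List Char) :
    pvPredB suf = true ↔ ∃ h ∈ pvAnchors, h <+: suf := by
  simp [pvPredB, List.any_eq_true, List.isPrefixOf_iff_prefix]

theorem pvPredB_nil : pvPredB [] = false := by decide

theorem pvScanB_none (suf : List Char) : ∀ i : Nat,
    pvScanB i suf = none ↔ ∀ j : Nat, pvPredB (suf.drop j) = false := by
  induction suf with
  | nil => intro i; simp [pvScanB, pvPredB_nil]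
  | cons c rest ih =>
    intro i
    by_cases hp : pvPredB (c :: rest) = true
    · simp only [pvScanB, hp, if_true]
      constructor
      · intro h; cases h
      · intro h; have := h 0; simp [hp] at this
    · have hstep : pvScanB i (c :: rest) = pvScanB (i + 1) rest := by
        simp [pvScanB, hp]
      rw [hstep, ih (i + 1)]
      rw [Bool.not_eq_true] at hp
      constructor
      · intro h j
        cases j with
        | zero => simpa using hp
        | succ j => simpa using h j
      · intro h j; simpa using h (j + 1)

theorem pvScanB_some (suf : List Char) : ∀ i j : Nat,
    pvScanB i suf = some j ↔
      i ≤ j ∧ pvPredB (suf.drop (j - i)) = true ∧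
        ∀ k < j - i, pvPredB (suf.drop k) = false := by
  induction suf with
  | nil =>
    intro i j
    simp only [pvScanB, List.drop_nil]
    constructor
    · intro h; cases h
    · rintro ⟨-, hp, -⟩; rw [pvPredB_nil] at hp; cases hp
  | cons c rest ih =>
    intro i j
    by_cases hp : pvPredB (c :: rest) = true
    · simp only [pvScanB, hp, if_true]
      constructor
      · rintro h
        injection h with h; subst h
        exact ⟨le_refl _, by simpa using hp, by omega⟩
      · rintro ⟨hij, _, hk⟩
        by_cases hji : j = i
        · simp [hji]
        · exfalso
          have h0 := hk 0 (by omega)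
          rw [List.drop_zero] at h0
          rw [hp] at h0; cases h0
    · have hstep : pvScanB i (c :: rest) = pvScanB (i + 1) rest := by
        simp [pvScanB, hp]
      rw [hstep, ih (i + 1) j]
      rw [Bool.not_eq_true] at hp
      constructor
      · rintro ⟨hij, hpred, hk⟩
        refine ⟨by omega, ?_, ?_⟩
        · have : j - i = (j - (i + 1)) + 1 := by omega
          rw [this]; simpa using hpred
        · intro k hkl
          cases k with
          | zero => simpa using hp
          | succ k =>
            have := hk k (by omega)
            simpa using this
      · rintro ⟨hij, hpred, hk⟩
        have hji : i ≠ j := by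
          rintro rfl
          simp only [Nat.sub_self, List.drop_zero] at hpred
          rw [hp] at hpred; cases hpred
        refine ⟨by omega, ?_, ?_⟩
        · have : j - i = (j - (i + 1)) + 1 := by omega
          rw [this] at hpred; simpa using hpred
        · intro k hkl
          have := hk (k + 1) (by omega)
          simpa using this

-- characterisation of A's running-minimum fold
theorem pvStepA_none_eq (cs h : List Char) :
    pvStepA cs none h =
      if PySem.Chars.find cs h ≠ -1 then some (PySem.Chars.find cs h) else none := rfl

theorem pvStepA_some_eq (cs h : List Char) (p : Int) :
    pvStepA cs (some p) h =
      if PySem.Chars.find cs h ≠ -1 ∧ PySem.Chars.find cs h < p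
      then some (PySem.Chars.find cs h) else some p := rfl

theorem pvFoldA_none (cs : List Char) : ∀ (hs : List (List Char)) (e : Option Int),
    hs.foldl (pvStepA cs) e = none →
      e = none ∧ ∀ h ∈ hs, PySem.Chars.find cs h = -1 := by
  intro hs
  induction hs with
  | nil => intro e h; simpa using h
  | cons h hs ih =>
    intro e hres
    obtain ⟨hstep, hrest⟩ := ih (pvStepA cs e h) hres
    have key : e = none ∧ PySem.Chars.find cs h = -1 := by
      cases e with
      | none =>
        rw [pvStepA_none_eq] at hstep
        by_cases hf : PySem.Chars.find cs h = -1
        · exact ⟨rfl, hf⟩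
        · rw [if_pos hf] at hstep; cases hstep
      | some p =>
        rw [pvStepA_some_eq] at hstep
        by_cases hc : PySem.Chars.find cs h ≠ -1 ∧ PySem.Chars.find cs h < p
        · rw [if_pos hc] at hstep; cases hstep
        · rw [if_neg hc] at hstep; cases hstep
    refine ⟨key.1, ?_⟩
    intro h' hh'
    rcases List.mem_cons.mp hh' with rfl | hm
    · exact key.2
    · exact hrest h' hm

theorem pvFoldA_some (cs : List Char) : ∀ (hs : List (List Char)) (e : Option Int) (p : Int),
    hs.foldl (pvStepA cs) e = some p →
      (e = some p ∨ ∃ h ∈ hs, PySem.Chars.find cs h = p ∧ p ≠ -1) ∧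
      (∀ h ∈ hs, PySem.Chars.find cs h = -1 ∨ p ≤ PySem.Chars.find cs h) ∧
      (∀ q, e = some q → p ≤ q) := by
  intro hs
  induction hs with
  | nil =>
    intro e p h
    simp only [List.foldl_nil] at h
    exact ⟨Or.inl h, by simp, fun q hq => by rw [h] at hq; injection hq with hq; omega⟩
  | cons h hs ih =>
    intro e p hres
    obtain ⟨h1, h2, h3⟩ := ih (pvStepA cs e h) p (by simpa using hres)
    have hF := PySem.Chars.neg_one_le_find cs h
    -- analyse the single step
    have hstep : (pvStepA cs e h = some p →
          e = some p ∨ (PySem.Chars.find cs h = p ∧ p ≠ -1)) ∧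
        (PySem.Chars.find cs h = -1 ∨ p ≤ PySem.Chars.find cs h) ∧
        (∀ q, e = some q → p ≤ q) := by
      cases e with
      | none =>
        rw [pvStepA_none_eq] at h3 ⊢
        by_cases hf : PySem.Chars.find cs h = -1
        · rw [if_neg (by simpa using hf)] at h3 ⊢
          refine ⟨(fun hx => by cases hx), Or.inl hf, (fun q hq => by cases hq)⟩
        · rw [if_pos hf] at h3 ⊢
          have hple := h3 (PySem.Chars.find cs h) rfl
          refine ⟨fun hx => ?_, Or.inr hple, (fun q hq => by cases hq)⟩
          injection hx with hx
          exact Or.inr ⟨hx, by omega⟩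
      | some p' =>
        rw [pvStepA_some_eq] at h3 ⊢
        by_cases hc : PySem.Chars.find cs h ≠ -1 ∧ PySem.Chars.find cs h < p'
        · rw [if_pos hc] at h3 ⊢
          have hple := h3 (PySem.Chars.find cs h) rfl
          refine ⟨fun hx => ?_, Or.inr hple, fun q hq => ?_⟩
          · injection hx with hx
            exact Or.inr ⟨hx, by omega⟩
          · injection hq with hq; subst hq
            omega
        · rw [if_neg hc] at h3 ⊢
          have hp' := h3 p' rfl
          refine ⟨fun hx => Or.inl hx.symm.symm, ?_, fun q hq => ?_⟩
          · rcases not_and_or.mp hc with hf | hlt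
            · exact Or.inl (by simpa using hf)
            · right; omega
          · injection hq with hq; subst hq; exact hp'
    refine ⟨?_, ?_, hstep.2.2⟩
    · rcases h1 with he | ⟨h', hm, hv⟩
      · rcases hstep.1 he with he' | hfp
        · exact Or.inl he'
        · exact Or.inr ⟨h, List.mem_cons_self .., hfp⟩
      · exact Or.inr ⟨h', List.mem_cons_of_mem _ hm, hv⟩
    · intro h' hh'
      rcases List.mem_cons.mp hh' with rfl | hm
      · exact hstep.2.1
      · exact h2 h' hm

-- a find that returned -1 means the anchor occurs at no position
theorem pvNoPrefix_of_find_neg (cs h : List Char)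
    (hf : PySem.Chars.find cs h = -1) : ∀ j : Nat, ¬ h <+: cs.drop j := by
  intro j hpre
  have hinf : ¬ h <:+: cs := (PySem.Chars.find_eq_neg_one_iff cs h).mp hf
  have : PySem.Chars.isIn h cs = true :=
    (PySem.Chars.exists_prefix_drop_iff_isIn h cs).mp ⟨j, hpre⟩
  exact hinf ((PySem.Chars.isIn_iff_infix h cs).mp this)

-- ===== VERDICT (by name: the statement is the Claim_ definition above) =====
theorem insert_concurrency_section_spec : Claim_equal_insert_concurrency_section := by
  intro content _
  unfold Spec_insert_concurrency_section insert_concurrency_section insert_concurrency_section_alt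
  set cs := content.toList with hcs
  cases hE : pvAnchors.foldl (pvStepA cs) none with
  | none =>
    obtain ⟨-, hall⟩ := pvFoldA_none cs pvAnchors none hE
    have hscan : pvScanB 0 cs = none := by
      rw [pvScanB_none]
      intro j
      rw [← Bool.not_eq_true, pvPredB_iff]
      rintro ⟨h, hm, hpre⟩
      exact pvNoPrefix_of_find_neg cs h (hall h hm) j hpre
    simp [hE, hscan]
  | some p =>
    obtain ⟨h1, h2, -⟩ := pvFoldA_some cs pvAnchors none p hE
    rcases h1 with he | ⟨h0, hm0, hf0, hne0⟩
    · cases he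
    have hp0 : 0 ≤ p := by
      have := PySem.Chars.neg_one_le_find cs h0
      omega
    have hfind0 : 0 ≤ PySem.Chars.find cs h0 := by omega
    obtain ⟨hpre0, hmin0⟩ := PySem.Chars.find_spec hfind0
    rw [hf0] at hpre0 hmin0
    have hscan : pvScanB 0 cs = some p.toNat := by
      rw [pvScanB_some]
      refine ⟨Nat.zero_le _, ?_, ?_⟩
      · simp only [Nat.sub_zero]
        rw [pvPredB_iff]
        exact ⟨h0, hm0, hpre0⟩
      · intro k hk
        simp only [Nat.sub_zero] at hk
        rw [← Bool.not_eq_true, pvPredB_iff]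
        rintro ⟨h, hm, hpre⟩
        rcases h2 h hm with hf | hge
        · exact pvNoPrefix_of_find_neg cs h hf k hpre
        · have hfpos : 0 ≤ PySem.Chars.find cs h := by omega
          obtain ⟨-, hmin⟩ := PySem.Chars.find_spec hfpos
          exact hmin k (by omega) hpre
    simp only [hE, hscan, Option.some.injEq]
    congr 2
    · rw [show (some p) = some ((p.toNat : Nat) : Int) by simp [Int.toNat_of_nonneg hp0]]
      rw [PySem.List.slice_to_natCast]
    · rw [show (some p) = some ((p.toNat : Nat) : Int) by simp [Int.toNat_of_nonneg hp0]]
      rw [PySem.List.slice_from_natCast]
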